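-- pv_equiv track=rewrite | github.com/peterpham301002/BusSignal | Test.py | highest_duplicate
-- ===== SOURCE A (Python) =====
-- from collections import Counter
--
-- def highest_duplicate(arr, yzero):    #get high and low voltages
--     counts = Counter(arr)
--     greater_than = {key: value for key, value in counts.items() if key >= yzero and value > 1}
--     less_than = {key: value for key, value in counts.items() if key < yzero and value > 1}
--     max_greater_than = max(greater_than.values()) if greater_than else 0
--     max_less_than = max(less_than.values()) if less_than else 0
--     max_greater_than_elements = {key: value for key, value in greater_than.items() if value == max_greater_than}
--     max_less_than_elements = {key: value for key, value in less_than.items() if value == max_less_than}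
--     return max_greater_than_elements, max_less_than_elements
-- ===== SOURCE B (Python) =====
-- from collections import Counter
--
-- def _bump(best, d, key, value):
--     # fold one duplicate (key, value) into a side's running (best count, result dict)
--     if value > best:
--         return value, {key: value}
--     if value == best:
--         d[key] = value
--     return best, d
--
-- def highest_duplicate(arr, yzero):
--     counts = Counter(arr)
--     best_hi, hi = 0, {}
--     best_lo, lo = 0, {}
--     for key, value in counts.items():
--         if value > 1:
--             if key >= yzero:
--                 best_hi, hi = _bump(best_hi, hi, key, value)
--             else:
--                 best_lo, lo = _bump(best_lo, lo, key, value)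
--     return hi, lo
-- ===== Notes on version B (the rewrite author's own statement) =====
-- stated objective: alternative
-- what changed: Replaces the four separate passes over the counts (two filtering dict comprehensions, a max over each side's values, and two final equality-filter comprehensions) by one interleaved scan of counts.items() that routes each duplicate to its side and maintains a running best count and best dict per side.
import Mathlib
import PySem

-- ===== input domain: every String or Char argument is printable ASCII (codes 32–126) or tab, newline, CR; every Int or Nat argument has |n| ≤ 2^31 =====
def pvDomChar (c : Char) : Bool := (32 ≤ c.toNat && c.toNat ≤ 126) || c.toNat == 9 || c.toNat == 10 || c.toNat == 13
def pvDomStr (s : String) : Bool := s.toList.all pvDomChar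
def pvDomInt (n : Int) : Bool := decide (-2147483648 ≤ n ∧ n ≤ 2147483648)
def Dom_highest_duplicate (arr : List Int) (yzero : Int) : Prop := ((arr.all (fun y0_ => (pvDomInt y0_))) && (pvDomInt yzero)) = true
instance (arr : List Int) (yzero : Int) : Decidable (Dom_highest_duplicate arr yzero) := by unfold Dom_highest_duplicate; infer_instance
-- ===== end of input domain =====

-- B fuses A's separate passes over the counts (two filtering comprehensions, a max per side,
-- two final equality filters) into one scan keeping a running best count and best dict per side.

-- ===== PORT A =====
def highest_duplicate (arr : List Int) (yzero : Int) : (List (Int × Int)) × (List (Int × Int)) :=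
  let counts := PySem.Dict.counter arr
  let greater_than := counts.items.foldl
    (fun d kv => if kv.1 ≥ yzero ∧ kv.2 > 1 then d.insert kv.1 kv.2 else d) PySem.Dict.empty
  let less_than := counts.items.foldl
    (fun d kv => if kv.1 < yzero ∧ kv.2 > 1 then d.insert kv.1 kv.2 else d) PySem.Dict.empty
  let max_greater_than : Int := if greater_than.items = [] then 0 else
    (PySem.List.max? greater_than.values (fun v => v)).getD 0
  let max_less_than : Int := if less_than.items = [] then 0 else
    (PySem.List.max? less_than.values (fun v => v)).getD 0
  let max_greater_than_elements := greater_than.items.foldl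
    (fun d kv => if kv.2 = max_greater_than then d.insert kv.1 kv.2 else d) PySem.Dict.empty
  let max_less_than_elements := less_than.items.foldl
    (fun d kv => if kv.2 = max_less_than then d.insert kv.1 kv.2 else d) PySem.Dict.empty
  (max_greater_than_elements.items, max_less_than_elements.items)

-- ===== PORT B =====
def bumpAlt (best : Int) (d : PySem.Dict Int Int) (key value : Int) :
    Int × PySem.Dict Int Int :=
  if value > best then (value, PySem.Dict.mk [(key, value)])
  else if value = best then (best, d.insert key value)
  else (best, d)

def highest_duplicate_alt (arr : List Int) (yzero : Int) : (List (Int × Int)) × (List (Int × Int)) :=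
  let counts := PySem.Dict.counter arr
  let s := counts.items.foldl
    (fun (s : (Int × PySem.Dict Int Int) × (Int × PySem.Dict Int Int)) kv =>
      if kv.2 > 1 then
        if kv.1 ≥ yzero then (bumpAlt s.1.1 s.1.2 kv.1 kv.2, s.2)
        else (s.1, bumpAlt s.2.1 s.2.2 kv.1 kv.2)
      else s)
    ((0, PySem.Dict.empty), (0, PySem.Dict.empty))
  (s.1.2.items, s.2.2.items)

-- ===== PRECONDITION & SPEC =====
def Spec_highest_duplicate (arr : List Int) (yzero : Int) (out : (List (Int × Int)) × (List (Int × Int))) : Prop := out = highest_duplicate_alt arr yzero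
instance (arr : List Int) (yzero : Int) (out : (List (Int × Int)) × (List (Int × Int))) : Decidable (Spec_highest_duplicate arr yzero out) := by unfold Spec_highest_duplicate; infer_instance

-- ===== CLAIM (what is proved, stated in full; the proofs are below) =====
def Claim_equal_highest_duplicate : Prop := ∀ (arr : List Int) (yzero : Int), Dom_highest_duplicate arr yzero → Spec_highest_duplicate arr yzero (highest_duplicate arr yzero)

-- ===== LEMMAS AND PROOFS =====

-- running max of the counts (second components), initialised at 0
def maxv (L : List (Int × Int)) : Int := L.foldl (fun a kv => max a kv.2) 0

-- B's routing fold splits into two independent folds over the two filtered halves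
theorem foldl_route {α σ τ : Type} (c : α → Prop) [DecidablePred c]
    (f : σ → α → σ) (g : τ → α → τ) (L : List α) (a : σ) (b : τ) :
    L.foldl (fun s x => if c x then (f s.1 x, s.2) else (s.1, g s.2 x)) (a, b)
    = ((L.filter (fun x => decide (c x))).foldl f a,
       (L.filter (fun x => !decide (c x))).foldl g b) := by
  induction L generalizing a b with
  | nil => rfl
  | cons x t ih => by_cases h : c x <;> simp [h, ih]

-- an insert loop over distinct fresh keys rebuilds exactly its input list of items
theorem items_insert_loop (G : List (Int × Int))
    (hkG : (G.map (fun kv : Int × Int => kv.1)).Nodup) :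
    (G.foldl (fun d kv => d.insert kv.1 kv.2) PySem.Dict.empty).items = G := by
  have h1 := PySem.Dict.items_foldl_insert_fresh G (fun kv : Int × Int => kv.1)
    (fun kv : Int × Int => kv.2) PySem.Dict.empty
    (fun a _ => PySem.Dict.contains_empty _) hkG
  simpa using h1

-- core invariant of B's per-side fold: running max and the dict of entries of maximal count
theorem bump_fold (G : List (Int × Int)) (hv : ∀ kv ∈ G, (1:Int) < kv.2)
    (hk : (G.map (fun kv => kv.1)).Nodup) :
    G.foldl (fun s kv => bumpAlt s.1 s.2 kv.1 kv.2) (0, PySem.Dict.empty)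
    = (maxv G, PySem.Dict.mk (G.filter (fun kv => kv.2 = maxv G))) := by
  induction G using List.reverseRecOn with
  | nil => rfl
  | append_singleton t x ih =>
    obtain ⟨xk, xv⟩ := x
    have hvt : ∀ kv ∈ t, (1:Int) < kv.2 := fun kv h => hv kv (List.mem_append_left _ h)
    have hk' : (t.map (fun kv => kv.1) ++ [xk]).Nodup := by simpa using hk
    have hkt : (t.map (fun kv => kv.1)).Nodup := hk'.of_append_left
    have hxnot : xk ∉ t.map (fun kv => kv.1) := by
      intro hm
      exact (List.disjoint_of_nodup_append hk') hm (by simp)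
    have hmax : maxv (t ++ [(xk, xv)]) = max (maxv t) xv := by
      simp [maxv, List.foldl_append]
    have hle : ∀ kv ∈ t, kv.2 ≤ maxv t :=
      (PySem.List.le_foldl_max_int t (fun kv => kv.2) 0).2
    rw [List.foldl_append, ih hvt hkt]
    simp only [List.foldl_cons, List.foldl_nil, bumpAlt, hmax]
    by_cases h1 : xv > maxv t
    · rw [if_pos h1]
      have hmx : max (maxv t) xv = xv := max_eq_right (le_of_lt h1)
      rw [hmx]
      have hft : t.filter (fun kv => kv.2 = xv) = [] := by
        rw [List.filter_eq_nil_iff]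
        intro kv hm
        simp only [decide_eq_true_eq]
        exact fun he => absurd (he ▸ hle kv hm) (not_le.mpr h1)
      apply Prod.ext
      · rfl
      · apply PySem.Dict.ext
        simp [List.filter_append, hft]
    · rw [if_neg h1]
      by_cases h2 : xv = maxv t
      · rw [if_pos h2]
        have hmx : max (maxv t) xv = maxv t := max_eq_left (le_of_eq h2)
        rw [hmx]
        have hnc : (PySem.Dict.mk (t.filter (fun kv => kv.2 = maxv t))).contains xk = false := by
          rw [PySem.Dict.contains_eq_decide_mem_keys]
          simp only [decide_eq_false_iff_not]
          intro hm
          simp only [PySem.Dict.keys] at hm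
          exact hxnot (List.map_subset _ (List.filter_sublist.subset) hm)
        apply Prod.ext
        · rfl
        · apply PySem.Dict.ext
          rw [PySem.Dict.items_insert_of_not_contains _ _ hnc]
          simp [List.filter_append, h2]
      · rw [if_neg h2]
        have hmx : max (maxv t) xv = maxv t := max_eq_left ((not_lt.mp h1))
        rw [hmx]
        simp [List.filter_append, h2]

-- A's per-side four passes collapse to "filter, then keep the entries of maximal count"
theorem sideA_eq (L : List (Int × Int)) (c : Int × Int → Prop) [DecidablePred c]
    (hk : (L.map (fun kv => kv.1)).Nodup)
    (G : List (Int × Int)) (hG : G = L.filter (fun kv => decide (c kv ∧ kv.2 > 1)))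
    (Ag : PySem.Dict Int Int)
    (hAg0 : Ag = L.foldl (fun d kv => if c kv ∧ kv.2 > 1 then d.insert kv.1 kv.2 else d) PySem.Dict.empty)
    (M : Int)
    (hM0 : M = if Ag.items = [] then 0 else (PySem.List.max? Ag.values (fun v => v)).getD 0) :
    (Ag.items.foldl (fun d kv => if kv.2 = M then d.insert kv.1 kv.2 else d) PySem.Dict.empty).items
      = G.filter (fun kv => decide (kv.2 = maxv G)) := by
  have hGsub : ∀ kv ∈ G, c kv ∧ (1:Int) < kv.2 := by
    intro kv hm
    rw [hG] at hm
    have := (List.mem_filter.mp hm).2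
    simpa using this
  have hkG : (G.map (fun kv : Int × Int => kv.1)).Nodup := by
    rw [hG]; exact (List.Sublist.map _ List.filter_sublist).nodup hk
  have hAg : Ag = PySem.Dict.mk G := by
    apply PySem.Dict.ext
    rw [hAg0]
    rw [PySem.List.foldl_ite_eq_foldl_filter (p := fun kv : Int × Int => c kv ∧ kv.2 > 1)]
    rw [← hG]
    exact items_insert_loop G hkG
  have hM : M = maxv G := by
    rw [hM0, hAg]
    show (if G = [] then 0 else (PySem.List.max? (PySem.Dict.mk G).values (fun v => v)).getD 0) = maxv G
    match hGe : G with
    | [] => simp [maxv]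
    | p :: t =>
      have hp2 : (1:Int) < p.2 := (hGsub p (by simp)).2
      have hv : (PySem.Dict.mk (p :: t)).values = p.2 :: t.map (fun kv => kv.2) := by
        simp [PySem.Dict.values]
      rw [hv, PySem.List.max?_id_cons]
      show (t.map (fun kv => kv.2)).foldl max p.2 = maxv (p :: t)
      rw [List.foldl_map]
      show t.foldl (fun a kv => max a kv.2) p.2 = (p :: t).foldl (fun a kv => max a kv.2) 0
      rw [List.foldl_cons]
      have : max (0:Int) p.2 = p.2 := max_eq_right (by omega)
      rw [this]
  rw [hAg, hM]
  show ((G.foldl (fun d kv => if kv.2 = maxv G then d.insert kv.1 kv.2 else d) PySem.Dict.empty)).items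
      = G.filter (fun kv => decide (kv.2 = maxv G))
  rw [PySem.List.foldl_ite_eq_foldl_filter (p := fun kv : Int × Int => kv.2 = maxv G)]
  exact items_insert_loop _ ((List.Sublist.map _ List.filter_sublist).nodup hkG)

-- ===== VERDICT (by name: the statement is the Claim_ definition above) =====
theorem highest_duplicate_spec : Claim_equal_highest_duplicate := by
  intro arr yzero _
  show highest_duplicate arr yzero = highest_duplicate_alt arr yzero
  have hk : ((PySem.Dict.counter arr).items.map (fun kv : Int × Int => kv.1)).Nodup := by
    have h := PySem.Dict.nodup_keys_counter arr
    simpa [PySem.Dict.keys] using h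
  set L : List (Int × Int) := (PySem.Dict.counter arr).items with hL
  -- the two sides, as single filters of L
  set G : List (Int × Int) := L.filter (fun kv => decide (kv.1 ≥ yzero ∧ kv.2 > 1)) with hGdef
  set H : List (Int × Int) := L.filter (fun kv => decide (kv.1 < yzero ∧ kv.2 > 1)) with hHdef
  -- A's value
  have hA : highest_duplicate arr yzero
      = (G.filter (fun kv => decide (kv.2 = maxv G)), H.filter (fun kv => decide (kv.2 = maxv H))) := by
    simp only [highest_duplicate]
    refine Prod.ext ?_ ?_
    · exact sideA_eq L (fun kv => kv.1 ≥ yzero) hk G hGdef _ rfl _ rfl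
    · exact sideA_eq L (fun kv => kv.1 < yzero) hk H hHdef _ rfl _ rfl
  -- B's value
  have hG1 : (L.filter (fun kv => decide (kv.2 > 1))).filter (fun kv => decide (kv.1 ≥ yzero)) = G := by
    rw [List.filter_filter, hGdef]
    apply List.filter_congr
    intro x _
    simp
  have hH1 : (L.filter (fun kv => decide (kv.2 > 1))).filter (fun kv => !decide (kv.1 ≥ yzero)) = H := by
    rw [List.filter_filter, hHdef]
    apply List.filter_congr
    intro x _
    by_cases h : yzero ≤ x.1
    · simp [h, not_lt.mpr h]
    · simp [h, not_le.mp h]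
  have hvG : ∀ kv ∈ G, (1:Int) < kv.2 := by
    intro kv hm
    rw [hGdef] at hm
    have := (List.mem_filter.mp hm).2
    simp at this
    exact this.2
  have hvH : ∀ kv ∈ H, (1:Int) < kv.2 := by
    intro kv hm
    rw [hHdef] at hm
    have := (List.mem_filter.mp hm).2
    simp at this
    exact this.2
  have hkG : (G.map (fun kv : Int × Int => kv.1)).Nodup := by
    rw [hGdef]; exact (List.Sublist.map _ List.filter_sublist).nodup hk
  have hkH : (H.map (fun kv : Int × Int => kv.1)).Nodup := by
    rw [hHdef]; exact (List.Sublist.map _ List.filter_sublist).nodup hk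
  have hB : highest_duplicate_alt arr yzero
      = (G.filter (fun kv => decide (kv.2 = maxv G)), H.filter (fun kv => decide (kv.2 = maxv H))) := by
    simp only [highest_duplicate_alt]
    have hfold : L.foldl
        (fun (s : (Int × PySem.Dict Int Int) × (Int × PySem.Dict Int Int)) kv =>
          if kv.2 > 1 then
            if kv.1 ≥ yzero then (bumpAlt s.1.1 s.1.2 kv.1 kv.2, s.2)
            else (s.1, bumpAlt s.2.1 s.2.2 kv.1 kv.2)
          else s)
        ((0, PySem.Dict.empty), (0, PySem.Dict.empty))
        = ((maxv G, PySem.Dict.mk (G.filter (fun kv => kv.2 = maxv G))),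
           (maxv H, PySem.Dict.mk (H.filter (fun kv => kv.2 = maxv H)))) := by
      calc L.foldl _ ((0, PySem.Dict.empty), (0, PySem.Dict.empty))
          = (L.filter (fun kv => decide (kv.2 > 1))).foldl
              (fun (s : (Int × PySem.Dict Int Int) × (Int × PySem.Dict Int Int)) kv =>
                if kv.1 ≥ yzero then (bumpAlt s.1.1 s.1.2 kv.1 kv.2, s.2)
                else (s.1, bumpAlt s.2.1 s.2.2 kv.1 kv.2))
              ((0, PySem.Dict.empty), (0, PySem.Dict.empty)) :=
            PySem.List.foldl_ite_eq_foldl_filter (fun kv : Int × Int => kv.2 > 1) _ L _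
        _ = (((L.filter (fun kv => decide (kv.2 > 1))).filter (fun kv => decide (kv.1 ≥ yzero))).foldl
              (fun s kv => bumpAlt s.1 s.2 kv.1 kv.2) (0, PySem.Dict.empty),
             ((L.filter (fun kv => decide (kv.2 > 1))).filter (fun kv => !decide (kv.1 ≥ yzero))).foldl
              (fun s kv => bumpAlt s.1 s.2 kv.1 kv.2) (0, PySem.Dict.empty)) :=
            foldl_route (fun kv : Int × Int => kv.1 ≥ yzero)
              (fun p kv => bumpAlt p.1 p.2 kv.1 kv.2) (fun p kv => bumpAlt p.1 p.2 kv.1 kv.2) _ _ _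
        _ = (G.foldl (fun s kv => bumpAlt s.1 s.2 kv.1 kv.2) (0, PySem.Dict.empty),
             H.foldl (fun s kv => bumpAlt s.1 s.2 kv.1 kv.2) (0, PySem.Dict.empty)) := by
            rw [hG1, hH1]
        _ = ((maxv G, PySem.Dict.mk (G.filter (fun kv => kv.2 = maxv G))),
             (maxv H, PySem.Dict.mk (H.filter (fun kv => kv.2 = maxv H)))) := by
            rw [bump_fold G hvG hkG, bump_fold H hvH hkH]
    rw [hfold]
  rw [hA, hB]
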